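-- pv_equiv track=rewrite | github.com/MartaVohnoutovaBukovec/IOS-655-Python-a-Bash | IOS 655 Python a Bash/homework/Moser/SubstitutionBruteForce_pokus.py | getIndexForWord
-- ===== SOURCE A (Python) =====
-- def getIndexForWord(word):
--     index = dict()
--     count = 0
--     for char in word:
--         if not char in index:
--             index[char] = count
--             count += 1
--
--     return "".join(str(index[c]) for c in word)
-- ===== SOURCE B (Python) =====
-- def getIndexForWord(word):
--     # closed form: each character's code is the number of distinct characters
--     # strictly before its first occurrence in the word
--     return "".join(str(len(set(word[:word.index(c)]))) for c in word)
-- ===== Notes on version B (the rewrite author's own statement) =====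
-- stated objective: simpler
-- what changed: Replaces the stateful dict+counter loop followed by a join re-scan with a one-line closed form: each character's code is len(set(word[:word.index(c)])), the number of distinct characters before its first occurrence.
import Mathlib
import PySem

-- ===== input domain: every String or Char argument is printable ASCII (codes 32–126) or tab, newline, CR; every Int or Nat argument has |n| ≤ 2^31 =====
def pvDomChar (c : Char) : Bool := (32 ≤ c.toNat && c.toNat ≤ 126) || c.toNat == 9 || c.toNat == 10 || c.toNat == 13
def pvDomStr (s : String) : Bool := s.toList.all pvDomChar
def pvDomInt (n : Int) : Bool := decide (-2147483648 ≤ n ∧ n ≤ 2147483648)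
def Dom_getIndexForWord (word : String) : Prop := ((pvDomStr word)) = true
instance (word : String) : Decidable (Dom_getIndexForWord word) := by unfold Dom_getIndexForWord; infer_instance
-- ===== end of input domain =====

-- B replaces A's dict+counter loop and join re-scan with a per-character closed form:
-- each character's code is the number of distinct characters before its first occurrence
-- (objective: simpler; B is quadratic where A is linear — no speed claim).


-- ===== PORT A =====
-- one loop step: 'if not char in index: index[char] = count; count += 1'
def pvStepA (s : PySem.Dict Char Int × Int) (c : Char) : PySem.Dict Char Int × Int :=
  if s.1.contains c then s else (s.1.insert c s.2, s.2 + 1)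

def getIndexForWord (word : String) : String :=
  let s := word.toList.foldl pvStepA (PySem.Dict.empty, 0)
  -- index[c]: every c of word is a key of the finished dict, so the lookup never raises; getD 0 is exact here
  PySem.Str.join "" (word.toList.map (fun c => PySem.Int.toStr (s.1.getD c 0)))

-- ===== PORT B =====
-- str(len(set(word[:word.index(c)]))) for each c of word; word.index(c) never raises
-- since c is drawn from word, so find (= -1 only when absent) is exact here
def getIndexForWord_alt (word : String) : String :=
  PySem.Str.join "" (word.toList.map (fun c =>
    PySem.Int.toStr ((PySem.Set.ofList
      (PySem.List.slice word.toList none (some (PySem.Chars.find word.toList [c])))).length : Int)))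

-- ===== PRECONDITION & SPEC =====
def Spec_getIndexForWord (word : String) (out : String) : Prop := out = getIndexForWord_alt word
instance (word : String) (out : String) : Decidable (Spec_getIndexForWord word out) := by unfold Spec_getIndexForWord; infer_instance

-- ===== CLAIM (what is proved, stated in full; the proofs are below) =====
def Claim_equal_getIndexForWord : Prop := ∀ (word : String), Dom_getIndexForWord word → Spec_getIndexForWord word (getIndexForWord word)

-- ===== LEMMAS AND PROOFS =====

-- [c] is a prefix of xs iff c is xs's head
theorem pvSingleton_prefix (c : Char) (xs : List Char) : [c] <+: xs ↔ xs.head? = some c := by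
  constructor
  · rintro ⟨t, rfl⟩; rfl
  · intro h
    cases xs with
    | nil => cases h
    | cons a t => simp only [List.head?_cons, Option.some.injEq] at h; exact ⟨t, by simp [h]⟩

-- word.index(c) is the first-occurrence index when c ∈ word
theorem pvFind_singleton (l : List Char) (c : Char) (hc : c ∈ l) :
    PySem.Chars.find l [c] = ((l.idxOf c : Nat) : Int) := by
  have hne : PySem.Chars.find l [c] ≠ -1 :=
    (PySem.Chars.find_ne_neg_one_iff l [c]).mpr ((List.singleton_infix_iff c l).mpr hc)
  have hz : PySem.Chars.findFrom l [c] ((0 : Nat) : Int) none = PySem.Chars.find l [c] := by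
    simp
  obtain ⟨hge, hpre, hmin⟩ :=
    PySem.Chars.findFrom_natCast_spec l [c] 0 (Nat.zero_le _) (by rw [hz]; exact hne)
  rw [hz] at hge hpre hmin
  have hfind : PySem.Chars.find l [c] = (((PySem.Chars.find l [c]).toNat : Nat) : Int) :=
    (Int.toNat_of_nonneg (by exact_mod_cast hge)).symm
  set m := (PySem.Chars.find l [c]).toNat with hm
  have hm? : l[m]? = some c := by
    rw [← List.head?_drop]
    exact (pvSingleton_prefix c _).mp hpre
  have hmlt : m < l.length := by
    by_contra h
    push Not at h
    rw [List.getElem?_eq_none h] at hm?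
    cases hm?
  have hc' : l[m] = c := by
    rw [List.getElem?_eq_getElem hmlt] at hm?
    exact Option.some.inj hm?
  have hidx : l.idxOf c = m := by
    show List.findIdx (· == c) l = m
    rw [List.findIdx_eq hmlt]
    refine ⟨by simp [hc'], ?_⟩
    intro j hj
    have hj' := hmin j (Nat.zero_le _) hj
    have hne' : l[j] ≠ c := by
      intro he
      exact hj' ((pvSingleton_prefix c _).mpr (by rw [List.head?_drop,
        List.getElem?_eq_getElem (lt_trans hj hmlt), he]))
    simpa using hne'
  rw [hidx, ← hfind]

-- A's fold keeps dict lookups equal to positions in the first-occurrence list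
theorem pvAfold (l : List Char) :
    ∀ (d : PySem.Dict Char Int) (cnt : Int) (seen : List Char),
      cnt = (seen.length : Int) →
      (∀ c, d.get? c = (PySem.List.index? seen c).map (fun n => (n : Int))) →
      ∀ c, (l.foldl pvStepA (d, cnt)).1.get? c =
        (PySem.List.index? (PySem.Set.update seen l) c).map (fun n => (n : Int)) := by
  induction l with
  | nil => intro d cnt seen _ hget c; exact hget c
  | cons x t ih =>
    intro d cnt seen hcnt hget c
    have hupd : PySem.Set.update seen (x :: t) = PySem.Set.update (PySem.Set.add seen x) t := rfl
    simp only [List.foldl_cons, pvStepA, hupd]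
    by_cases hx : x ∈ seen
    · have hcont : d.contains x = true := by
        obtain ⟨k, hk⟩ := Option.isSome_iff_exists.mp ((PySem.List.index?_isSome_iff seen x).mpr hx)
        rw [PySem.Dict.contains_eq_isSome_get?, hget x, hk]
        rfl
      have hadd : PySem.Set.add seen x = seen := by
        simp [PySem.Set.add, PySem.Set.contains, List.contains_eq_mem, hx]
      rw [if_pos hcont, hadd]
      exact ih d cnt seen hcnt hget c
    · have hcont : ¬ d.contains x = true := by
        rw [PySem.Dict.contains_eq_isSome_get?, hget x,
          (PySem.List.index?_eq_none_iff seen x).mpr hx]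
        exact Bool.false_ne_true
      have hadd : PySem.Set.add seen x = seen ++ [x] := by
        simp [PySem.Set.add, PySem.Set.contains, List.contains_eq_mem, hx]
      rw [if_neg hcont, hadd]
      refine ih (d.insert x cnt) (cnt + 1) (seen ++ [x]) (by simp [hcnt]) ?_ c
      intro c'
      rw [PySem.Dict.get?_insert]
      by_cases hc' : c' = x
      · subst hc'
        rw [if_pos rfl, PySem.List.index?_append_singleton_self seen c' hx, hcnt]
        rfl
      · rw [if_neg hc', hget c']
        by_cases hcs : c' ∈ seen
        · rw [PySem.List.index?_append_of_mem [x] hcs]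
        · rw [(PySem.List.index?_eq_none_iff seen c').mpr hcs,
            (PySem.List.index?_eq_none_iff (seen ++ [x]) c').mpr
              (by intro hmem
                  rcases List.mem_append.mp hmem with hm | hm
                  · exact hcs hm
                  · exact hc' (List.mem_singleton.mp hm))]

-- chars already in the accumulator keep their position through an update
theorem pvIdxPreserve (l : List Char) :
    ∀ (s : List Char) (c : Char), c ∈ s →
      PySem.List.index? (PySem.Set.update s l) c = PySem.List.index? s c := by
  induction l with
  | nil => intro s c _; rfl
  | cons x t ih =>
    intro s c hc
    have hupd : PySem.Set.update s (x :: t) = PySem.Set.update (PySem.Set.add s x) t := rfl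
    rw [hupd]
    have hmem : c ∈ PySem.Set.add s x := (PySem.Set.mem_add s x c).mpr (Or.inl hc)
    rw [ih (PySem.Set.add s x) c hmem]
    by_cases hx : x ∈ s
    · have : PySem.Set.add s x = s := by
        simp [PySem.Set.add, PySem.Set.contains, List.contains_eq_mem, hx]
      rw [this]
    · have : PySem.Set.add s x = s ++ [x] := by
        simp [PySem.Set.add, PySem.Set.contains, List.contains_eq_mem, hx]
      rw [this, PySem.List.index?_append_of_mem [x] hc]

-- position of c in the dedup of l = number of distinct chars before c's first occurrence
theorem pvIdxDedup (l : List Char) :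
    ∀ (s : List Char) (c : Char), c ∈ l → c ∉ s →
      PySem.List.index? (PySem.Set.update s l) c =
        some (PySem.Set.update s (l.take (l.idxOf c))).length := by
  induction l with
  | nil => intro s c hc _; cases hc
  | cons x t ih =>
    intro s c hc hcs
    have hupd : PySem.Set.update s (x :: t) = PySem.Set.update (PySem.Set.add s x) t := rfl
    by_cases hcx : c = x
    · subst hcx
      have hadd : PySem.Set.add s c = s ++ [c] := by
        simp [PySem.Set.add, PySem.Set.contains, List.contains_eq_mem, hcs]
      rw [hupd, pvIdxPreserve t (PySem.Set.add s c) c ((PySem.Set.mem_add s c c).mpr (Or.inr rfl)),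
        List.idxOf_cons_self, List.take_zero]
      rw [hadd, PySem.List.index?_append_singleton_self s c hcs]
      rfl
    · have hct : c ∈ t := by
        rcases List.mem_cons.mp hc with h | h
        · exact absurd h hcx
        · exact h
      have hcadd : c ∉ PySem.Set.add s x := by
        intro h
        rcases (PySem.Set.mem_add s x c).mp h with h | h
        · exact hcs h
        · exact hcx h
      rw [hupd, ih (PySem.Set.add s x) c hct hcadd,
        List.idxOf_cons_ne t (Ne.symm hcx), List.take_succ_cons]
      rfl

-- ===== VERDICT (by name: the statement is the Claim_ definition above) =====
theorem getIndexForWord_spec : Claim_equal_getIndexForWord := by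
  intro word _
  show PySem.Str.join "" _ = PySem.Str.join "" _
  congr 1
  apply List.map_congr_left
  intro c hc
  have hA := pvAfold word.toList PySem.Dict.empty 0 [] rfl
    (fun c => by rw [PySem.Dict.get?_empty]; rfl) c
  have hB := pvIdxDedup word.toList [] c hc (List.not_mem_nil)
  rw [PySem.Dict.getD_eq_get?_getD, hA, hB]
  rw [pvFind_singleton word.toList c hc, PySem.List.slice_to_natCast]
  rfl
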